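-- pv_equiv track=rewrite | github.com/ChenBingwei/algorithms | daily/ltc719_find_k_th_smallest_pair_distance.py | count
-- ===== SOURCE A (Python) =====
-- def count(nums, target):
--     n = len(nums)
--     cnt = 0
--     for i in range(n):
--         left = 0
--         right = i
--         while left < right:
--             mid = (left + right) // 2
--             if nums[i] - nums[mid] >= target:
--                 left = mid + 1
--             else:
--                 right = mid
--         cnt += i - right
--     return cnt
-- ===== SOURCE B (Python) =====
-- def count(nums, target):
--     # Two-pointer sliding window over the sorted array: for each right,
--     # advance left past all earlier elements at distance >= target.
--     cnt = 0
--     left = 0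
--     for right in range(len(nums)):
--         while left < right and nums[right] - nums[left] >= target:
--             left += 1
--         cnt += right - left
--     return cnt
-- ===== Notes on version B (the rewrite author's own statement) =====
-- stated objective: faster
-- what changed: Replaced the per-index binary search with a single two-pointer sliding window whose left pointer only ever moves forward across the whole pass: O(n) instead of O(n log n) on the sorted arrays this helper is for.
-- outside the precondition, e.g. on count([0, 1, 3, 2], 2): A returns 3, B returns 2
import Mathlib
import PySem

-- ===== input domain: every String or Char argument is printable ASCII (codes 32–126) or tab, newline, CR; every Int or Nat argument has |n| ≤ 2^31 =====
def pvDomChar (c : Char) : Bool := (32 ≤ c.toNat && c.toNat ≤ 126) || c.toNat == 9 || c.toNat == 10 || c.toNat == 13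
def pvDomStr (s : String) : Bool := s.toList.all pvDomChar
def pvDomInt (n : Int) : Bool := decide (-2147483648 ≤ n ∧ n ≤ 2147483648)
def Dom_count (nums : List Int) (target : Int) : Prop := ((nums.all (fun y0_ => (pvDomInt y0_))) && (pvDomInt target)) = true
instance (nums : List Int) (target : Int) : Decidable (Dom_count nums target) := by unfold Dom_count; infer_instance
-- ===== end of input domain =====

-- B replaces A's per-index binary search by a single two-pointer sliding window (the left pointer
-- only ever moves forward across the whole pass), an asymptotically faster single-pass algorithm; return values
-- proved equal on Pre_ (sorted input, or target below/above every pairwise difference).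

-- ===== PORT A =====
-- the inner while loop of A (binary search on nums[0:i]); indices are always in range, so pyGetD is exact
def bsA (nums : List Int) (target i left right : Int) : Int :=
  if h : left < right then
    let mid := PySem.Int.floordiv (left + right) 2
    if target ≤ PySem.List.pyGetD nums i 0 - PySem.List.pyGetD nums mid 0 then
      bsA nums target i (mid + 1) right
    else
      bsA nums target i left mid
  else right
termination_by (right - left).toNat
decreasing_by
  · have _hb := PySem.Int.floordiv_two_mid_bounds (le_of_lt h)
    omega
  · have h2 : PySem.Int.floordiv (left + right) 2 < right := by
      rw [PySem.Int.floordiv_lt_iff_lt_mul (by omega)]; omega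
    omega

def count (nums : List Int) (target : Int) : Int :=
  (PySem.List.pyRange 0 (nums.length : Int) 1).foldl
    (fun cnt i => cnt + (i - bsA nums target i 0 i)) 0

-- ===== PORT B =====
-- the inner while loop of B (advance left while the pair is too far apart)
def tpB (nums : List Int) (target right left : Int) : Int :=
  if h : left < right ∧ target ≤ PySem.List.pyGetD nums right 0 - PySem.List.pyGetD nums left 0 then
    tpB nums target right (left + 1)
  else left
termination_by (right - left).toNat
decreasing_by omega

def count_alt (nums : List Int) (target : Int) : Int :=
  ((PySem.List.pyRange 0 (nums.length : Int) 1).foldl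
    (fun s right =>
      let l := tpB nums target right s.2
      (s.1 + (right - l), l)) ((0 : Int), (0 : Int))).1

-- ===== PRECONDITION & SPEC =====
-- Pre_ excludes unsorted lists whose pairwise differences straddle target: there A's binary search
-- probes a sorted order that is not there, so its value (even negative "counts") is an accident of
-- the probe sequence; LeetCode 719 calls this helper only on a sorted array.  (If target is below
-- or above every pairwise difference the search degenerates and A and B agree even unsorted, so
-- those inputs stay inside Pre_.)
def Pre_count (nums : List Int) (target : Int) : Prop :=
  List.Pairwise (· ≤ ·) nums ∨
  (∀ x ∈ nums, ∀ y ∈ nums, target ≤ x - y) ∨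
  (∀ x ∈ nums, ∀ y ∈ nums, x - y < target)
instance (nums : List Int) (target : Int) : Decidable (Pre_count nums target) := by
  unfold Pre_count; infer_instance

def pvWitness_count : List Int × Int := ([0, 2, 3, 7], 3)

def Spec_count (nums : List Int) (target : Int) (out : Int) : Prop := out = count_alt nums target
instance (nums : List Int) (target : Int) (out : Int) : Decidable (Spec_count nums target out) := by
  unfold Spec_count; infer_instance

-- ===== CLAIM (what is proved, stated in full; the proofs are below) =====
def Claim_equal_count : Prop := ∀ (nums : List Int) (target : Int), Dom_count nums target → Pre_count nums target → Spec_count nums target (count nums target)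

-- ===== LEMMAS AND PROOFS =====

-- characterisation of A's binary search on a (locally) sorted list
theorem bsA_char (nums : List Int) (target i : Int)
    (H1 : ∀ a b : Int, 0 ≤ a → a ≤ b → b < (nums.length : Int) →
      target ≤ PySem.List.pyGetD nums i 0 - PySem.List.pyGetD nums b 0 →
      target ≤ PySem.List.pyGetD nums i 0 - PySem.List.pyGetD nums a 0)
    (him : i < (nums.length : Int)) :
    ∀ (n : ℕ) (l r : Int), (r - l).toNat = n → 0 ≤ l → l ≤ r → r ≤ i →
    (∀ j, 0 ≤ j → j < l → target ≤ PySem.List.pyGetD nums i 0 - PySem.List.pyGetD nums j 0) →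
    (∀ j, r ≤ j → j < i → ¬ target ≤ PySem.List.pyGetD nums i 0 - PySem.List.pyGetD nums j 0) →
    0 ≤ bsA nums target i l r ∧ bsA nums target i l r ≤ r ∧
    (∀ j, 0 ≤ j → j < bsA nums target i l r →
      target ≤ PySem.List.pyGetD nums i 0 - PySem.List.pyGetD nums j 0) ∧
    (∀ j, bsA nums target i l r ≤ j → j < i →
      ¬ target ≤ PySem.List.pyGetD nums i 0 - PySem.List.pyGetD nums j 0) := by
  intro n
  induction n using Nat.strong_induction_on with
  | _ n ih =>
    intro l r hn h0l hlr hri hL hR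
    rw [bsA]
    by_cases h : l < r
    · simp only [dif_pos h]
      have hb := PySem.Int.floordiv_two_mid_bounds (le_of_lt h)
      have hmidlt : PySem.Int.floordiv (l + r) 2 < r := by
        rw [PySem.Int.floordiv_lt_iff_lt_mul (by omega)]; omega
      set mid := PySem.Int.floordiv (l + r) 2 with hmid
      by_cases hc : target ≤ PySem.List.pyGetD nums i 0 - PySem.List.pyGetD nums mid 0
      · simp only [if_pos hc]
        refine ih (r - (mid + 1)).toNat (by omega) (mid + 1) r rfl (by omega) (by omega) hri ?_ hR
        intro j hj0 hjm
        exact H1 j mid hj0 (by omega) (by omega) hc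
      · simp only [if_neg hc]
        obtain ⟨a1, a2, a3, a4⟩ :=
          ih (mid - l).toNat (by omega) l mid rfl h0l (by omega) (by omega) hL (by
            intro j hjm hji hP
            exact hc (H1 mid j (by omega) hjm (by omega) hP))
        exact ⟨a1, by omega, a3, a4⟩
    · simp only [dif_neg h]
      have hlr' : l = r := by omega
      exact ⟨by omega, le_refl r, by intro j hj0 hjr; exact hL j hj0 (by omega), hR⟩

-- characterisation of B's inner while loop (no sortedness needed)
theorem tpB_char (nums : List Int) (target i : Int) :
    ∀ (n : ℕ) (l : Int), (i - l).toNat = n → l ≤ i →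
    l ≤ tpB nums target i l ∧ tpB nums target i l ≤ i ∧
    (∀ j, l ≤ j → j < tpB nums target i l →
      target ≤ PySem.List.pyGetD nums i 0 - PySem.List.pyGetD nums j 0) ∧
    (tpB nums target i l < i →
      ¬ target ≤ PySem.List.pyGetD nums i 0 -
        PySem.List.pyGetD nums (tpB nums target i l) 0) := by
  intro n
  induction n using Nat.strong_induction_on with
  | _ n ih =>
    intro l hn hli
    rw [tpB]
    by_cases h : l < i ∧ target ≤ PySem.List.pyGetD nums i 0 - PySem.List.pyGetD nums l 0
    · simp only [dif_pos h]
      obtain ⟨h1, h2, h3, h4⟩ := ih (i - (l + 1)).toNat (by omega) (l + 1) rfl (by omega)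
      refine ⟨by omega, h2, ?_, h4⟩
      intro j hlj hjy
      rcases eq_or_lt_of_le hlj with hj | hj
      · rw [← hj]; exact h.2
      · exact h3 j (by omega) hjy
    · simp only [dif_neg h]
      refine ⟨le_refl l, hli, by intro j h1 h2; omega, ?_⟩
      intro hlt hP
      exact h ⟨hlt, hP⟩

-- the two inner loops land on the same index
theorem inner_eq (nums : List Int) (target i l : Int)
    (H1 : ∀ a b : Int, 0 ≤ a → a ≤ b → b < (nums.length : Int) →
      target ≤ PySem.List.pyGetD nums i 0 - PySem.List.pyGetD nums b 0 →
      target ≤ PySem.List.pyGetD nums i 0 - PySem.List.pyGetD nums a 0)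
    (h0i : 0 ≤ i) (him : i < (nums.length : Int)) (h0l : 0 ≤ l) (hli : l ≤ i)
    (hpre : ∀ j, 0 ≤ j → j < l →
      target ≤ PySem.List.pyGetD nums i 0 - PySem.List.pyGetD nums j 0) :
    bsA nums target i 0 i = tpB nums target i l := by
  obtain ⟨hx0, hxi, hxP, hxN⟩ :=
    bsA_char nums target i H1 him (i - 0).toNat 0 i rfl (le_refl 0) h0i (le_refl i)
      (by intro j h1 h2; omega) (by intro j h1 h2; omega)
  obtain ⟨hy1, hy2, hy3, hy4⟩ := tpB_char nums target i (i - l).toNat l rfl hli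
  set x := bsA nums target i 0 i
  set y := tpB nums target i l
  by_contra hne
  rcases lt_or_gt_of_ne hne with hlt | hgt
  · -- x < y : x < i so ¬P x, but x < y gives P x
    have hxlti : x < i := by omega
    have hNx := hxN x (le_refl x) hxlti
    by_cases hxl : x < l
    · exact hNx (hpre x hx0 hxl)
    · exact hNx (hy3 x (by omega) hlt)
  · -- y < x : y < i so ¬P y, but y < x gives P y
    have hylti : y < i := by omega
    exact hy4 hylti (hxP y (by omega) hgt)

-- main fold invariant over the prefix range [0, k)
theorem fold_inv (nums : List Int) (target : Int)
    (H1 : ∀ i a b : Int, 0 ≤ i → i < (nums.length : Int) →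
      0 ≤ a → a ≤ b → b < (nums.length : Int) →
      target ≤ PySem.List.pyGetD nums i 0 - PySem.List.pyGetD nums b 0 →
      target ≤ PySem.List.pyGetD nums i 0 - PySem.List.pyGetD nums a 0)
    (H2 : ∀ j i i' : Int, 0 ≤ j → j < (nums.length : Int) →
      0 ≤ i → i ≤ i' → i' < (nums.length : Int) →
      target ≤ PySem.List.pyGetD nums i 0 - PySem.List.pyGetD nums j 0 →
      target ≤ PySem.List.pyGetD nums i' 0 - PySem.List.pyGetD nums j 0) :
    ∀ (k : ℕ), k ≤ nums.length →
    (List.map (Nat.cast : ℕ → ℤ) (List.range k)).foldl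
        (fun cnt i => cnt + (i - bsA nums target i 0 i)) 0 =
      ((List.map (Nat.cast : ℕ → ℤ) (List.range k)).foldl
        (fun s right =>
          let l := tpB nums target right s.2
          (s.1 + (right - l), l)) ((0 : Int), (0 : Int))).1 ∧
    0 ≤ ((List.map (Nat.cast : ℕ → ℤ) (List.range k)).foldl
        (fun s right =>
          let l := tpB nums target right s.2
          (s.1 + (right - l), l)) ((0 : Int), (0 : Int))).2 ∧
    ((List.map (Nat.cast : ℕ → ℤ) (List.range k)).foldl
        (fun s right =>
          let l := tpB nums target right s.2
          (s.1 + (right - l), l)) ((0 : Int), (0 : Int))).2 ≤ (k : Int) ∧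
    (∀ j, 0 ≤ j →
      j < ((List.map (Nat.cast : ℕ → ℤ) (List.range k)).foldl
        (fun s right =>
          let l := tpB nums target right s.2
          (s.1 + (right - l), l)) ((0 : Int), (0 : Int))).2 →
      ∀ i', (k : Int) ≤ i' → i' < (nums.length : Int) →
        target ≤ PySem.List.pyGetD nums i' 0 - PySem.List.pyGetD nums j 0) := by
  intro k
  induction k with
  | zero =>
    intro _
    refine ⟨by simp, by simp, by simp, ?_⟩
    intro j h1 h2
    simp only [List.range_zero, List.map_nil, List.foldl_nil] at h2
    exact absurd h2 (by omega)
  | succ k ihk =>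
    intro hk1
    obtain ⟨ihA, ihl0, ihlk, ihP⟩ := ihk (by omega)
    rw [List.range_succ, List.map_append, List.foldl_append, List.foldl_append]
    simp only [List.map_cons, List.map_nil, List.foldl_cons, List.foldl_nil]
    set s := ((List.map (Nat.cast : ℕ → ℤ) (List.range k)).foldl
        (fun s right =>
          let l := tpB nums target right s.2
          (s.1 + (right - l), l)) ((0 : Int), (0 : Int)))
    have hkm : (k : Int) < (nums.length : Int) := by exact_mod_cast hk1
    have hinner : bsA nums target (k : Int) 0 (k : Int) = tpB nums target (k : Int) s.2 :=
      inner_eq nums target (k : Int) s.2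
        (fun a b ha hab hb => H1 (k : Int) a b (by positivity) hkm ha hab hb)
        (by positivity) hkm ihl0 ihlk
        (fun j h1 h2 => ihP j h1 h2 (k : Int) (le_refl _) hkm)
    obtain ⟨hy1, hy2, hy3, _⟩ :=
      tpB_char nums target (k : Int) ((k : Int) - s.2).toNat s.2 rfl ihlk
    refine ⟨by rw [ihA, hinner], by omega, by push_cast; omega, ?_⟩
    intro j hj0 hjl i' hi1 hi2
    have hP : target ≤ PySem.List.pyGetD nums (k : Int) 0 - PySem.List.pyGetD nums j 0 := by
      by_cases hjs : j < s.2
      · exact ihP j hj0 hjs (k : Int) (le_refl _) hkm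
      · exact hy3 j (by omega) hjl
    exact H2 j (k : Int) i' hj0 (by omega) (by positivity) (by push_cast at hi1 ⊢; omega) hi2 hP

-- ===== VERDICT (by name: the statement is the Claim_ definition above) =====
theorem count_spec : Claim_equal_count := by
  intro nums target _ hpre
  unfold Spec_count count count_alt
  have hmem : ∀ i : Int, 0 ≤ i → i < (nums.length : Int) →
      PySem.List.pyGetD nums i 0 ∈ nums := by
    intro i h0 h1
    exact PySem.List.pyGetD_mem nums 0 (by simp [PySem.Raise.InRange]; omega)
  have hsortG : List.Pairwise (· ≤ ·) nums →
      ∀ a b : Int, 0 ≤ a → a ≤ b → b < (nums.length : Int) →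
      PySem.List.pyGetD nums a 0 ≤ PySem.List.pyGetD nums b 0 := by
    intro hs a b ha hab hb
    have hbn : b.toNat < nums.length := by omega
    have han : a.toNat < nums.length := by omega
    rw [PySem.List.pyGetD_eq_getElem nums 0 ha (by omega),
        PySem.List.pyGetD_eq_getElem nums 0 (by omega) (by omega)]
    rcases eq_or_lt_of_le hab with h | h
    · subst h; exact le_refl _
    · exact List.pairwise_iff_getElem.mp hs a.toNat b.toNat han hbn (by omega)
  have H1 : ∀ i a b : Int, 0 ≤ i → i < (nums.length : Int) →
      0 ≤ a → a ≤ b → b < (nums.length : Int) →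
      target ≤ PySem.List.pyGetD nums i 0 - PySem.List.pyGetD nums b 0 →
      target ≤ PySem.List.pyGetD nums i 0 - PySem.List.pyGetD nums a 0 := by
    rcases hpre with hs | hbig | hsmall
    · intro i a b _ _ ha hab hb hP
      have := hsortG hs a b ha hab hb
      omega
    · intro i a b h0i hi ha hab hb _
      exact hbig _ (hmem i h0i hi) _ (hmem a ha (by omega))
    · intro i a b h0i hi ha hab hb hP
      exact absurd hP (by have := hsmall _ (hmem i h0i hi) _ (hmem b (by omega) hb); omega)
  have H2 : ∀ j i i' : Int, 0 ≤ j → j < (nums.length : Int) →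
      0 ≤ i → i ≤ i' → i' < (nums.length : Int) →
      target ≤ PySem.List.pyGetD nums i 0 - PySem.List.pyGetD nums j 0 →
      target ≤ PySem.List.pyGetD nums i' 0 - PySem.List.pyGetD nums j 0 := by
    rcases hpre with hs | hbig | hsmall
    · intro j i i' hj0 hj h0i hii hi hP
      have := hsortG hs i i' h0i hii hi
      omega
    · intro j i i' hj0 hj h0i hii hi _
      exact hbig _ (hmem i' (by omega) hi) _ (hmem j hj0 hj)
    · intro j i i' hj0 hj h0i hii hi hP
      exact absurd hP (by have := hsmall _ (hmem i h0i (by omega)) _ (hmem j hj0 hj); omega)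
  have hrw : PySem.List.pyRange 0 (nums.length : Int) 1 =
      List.map (Nat.cast : ℕ → ℤ) (List.range nums.length) := by
    rw [PySem.List.pyRange_one]
    simp
  rw [hrw]
  exact (fold_inv nums target H1 H2 nums.length (le_refl _)).1
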